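-- pv_equiv track=rewrite | github.com/JohnnyD3pp/Algoritmos-2-Semestre | Atividade 02/Q4.py | calcular_qtd_vendida_de_cada_produto
-- ===== SOURCE A (Python) =====
-- def calcular_qtd_vendida_de_cada_produto(vendas):
--     qtd_por_item = {}
--     for venda in vendas:
--         for produto in venda:
--             if produto in qtd_por_item:
--                 qtd_por_item[produto] += 1
--             else:
--                 qtd_por_item[produto] = 1
--     return qtd_por_item
-- ===== SOURCE B (Python) =====
-- def calcular_qtd_vendida_de_cada_produto(vendas):
--     flat = [p for venda in vendas for p in venda]
--     return {p: flat.count(p) for p in dict.fromkeys(flat)}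
-- ===== Notes on version B (the rewrite author's own statement) =====
-- stated objective: idiomatic
-- what changed: Replaces the incremental dict-accumulation loop by flattening all products once and building the result with a dict comprehension that counts each distinct product (first-appearance order) via list.count.
import Mathlib
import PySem

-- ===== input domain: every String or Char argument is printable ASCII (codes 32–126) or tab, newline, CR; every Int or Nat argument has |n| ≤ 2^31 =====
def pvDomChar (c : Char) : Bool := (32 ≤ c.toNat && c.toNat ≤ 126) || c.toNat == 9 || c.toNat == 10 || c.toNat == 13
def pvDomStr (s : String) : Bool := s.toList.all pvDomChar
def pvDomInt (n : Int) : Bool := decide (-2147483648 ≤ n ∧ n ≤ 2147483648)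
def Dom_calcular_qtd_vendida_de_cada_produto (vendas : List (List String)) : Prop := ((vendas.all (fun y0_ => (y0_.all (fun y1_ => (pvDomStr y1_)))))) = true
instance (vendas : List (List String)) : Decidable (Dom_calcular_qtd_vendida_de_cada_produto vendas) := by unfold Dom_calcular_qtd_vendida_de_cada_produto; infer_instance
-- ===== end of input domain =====

-- ===== PORT A =====
-- Nested for-loops accumulating counts in a dict; returned dict as its items list.
def calcular_qtd_vendida_de_cada_produto (vendas : List (List String)) : List (String × Int) :=
  (vendas.foldl
    (fun qtd venda =>
      venda.foldl
        (fun qtd produto =>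
          if qtd.contains produto then qtd.insert produto (qtd.getD produto 0 + 1)
          else qtd.insert produto 1)
        qtd)
    PySem.Dict.empty).items

-- ===== PORT B =====
-- B (idiomatic, not faster): flatten + dict comprehension counting each distinct product, instead of A's incremental accumulation.
-- Source B: flatten once, then a dict comprehension over dict.fromkeys(flat) counting with flat.count.
def calcular_qtd_vendida_de_cada_produto_alt (vendas : List (List String)) : List (String × Int) :=
  let flat := vendas.flatMap (fun venda => venda)
  (PySem.List.dedup flat).map (fun p => (p, (flat.count p : Int)))

-- ===== PRECONDITION & SPEC =====
def Spec_calcular_qtd_vendida_de_cada_produto (vendas : List (List String)) (out : List (String × Int)) : Prop := out = calcular_qtd_vendida_de_cada_produto_alt vendas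
instance (vendas : List (List String)) (out : List (String × Int)) : Decidable (Spec_calcular_qtd_vendida_de_cada_produto vendas out) := by unfold Spec_calcular_qtd_vendida_de_cada_produto; infer_instance

-- ===== CLAIM (what is proved, stated in full; the proofs are below) =====
def Claim_equal_calcular_qtd_vendida_de_cada_produto : Prop := ∀ (vendas : List (List String)), Dom_calcular_qtd_vendida_de_cada_produto vendas → Spec_calcular_qtd_vendida_de_cada_produto vendas (calcular_qtd_vendida_de_cada_produto vendas)

-- ===== LEMMAS AND PROOFS =====
-- The inner-loop body is the standard counter step once the not-yet-present branch is rewritten.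
theorem step_eq (qtd : PySem.Dict String Int) (p : String) :
    (if qtd.contains p then qtd.insert p (qtd.getD p 0 + 1) else qtd.insert p 1)
      = qtd.insert p (qtd.getD p 0 + 1) := by
  by_cases h : qtd.contains p = true
  · simp [h]
  · simp only [Bool.not_eq_true] at h
    simp [h, PySem.Dict.getD_of_not_contains]

theorem fold_flat (vendas : List (List String)) (d : PySem.Dict String Int) :
    vendas.foldl
      (fun qtd venda =>
        venda.foldl
          (fun qtd produto =>
            if qtd.contains produto then qtd.insert produto (qtd.getD produto 0 + 1)
            else qtd.insert produto 1)
          qtd)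
      d
    = (vendas.flatMap (fun venda => venda)).foldl
        (fun qtd p => qtd.insert p (qtd.getD p 0 + 1)) d := by
  induction vendas generalizing d with
  | nil => simp
  | cons v vs ih =>
    simp only [List.foldl_cons, List.flatMap_cons, List.foldl_append, ih]
    congr 1
    simp only [step_eq]

-- ===== VERDICT (by name: the statement is the Claim_ definition above) =====
theorem calcular_qtd_vendida_de_cada_produto_spec : Claim_equal_calcular_qtd_vendida_de_cada_produto := by
  intro vendas _
  unfold Spec_calcular_qtd_vendida_de_cada_produto
  unfold calcular_qtd_vendida_de_cada_produto calcular_qtd_vendida_de_cada_produto_alt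
  rw [fold_flat, PySem.Dict.foldl_insert_getD_add_one_eq_counter, PySem.Dict.items_counter]
  simp [PySem.List.dedup_eq_ofList]
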